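-- pv_equiv track=rewrite | github.com/RESH-22/UNSTOP-100-DAYS-CODING-SPRINT | Day 11/INVERSION COUNT.py | user_logic
-- ===== SOURCE A (Python) =====
-- def user_logic(n, arr):
--     from collections import defaultdict
--
--     groups = defaultdict(int)
--
--     for x in arr:
--         msb = x.bit_length()
--         groups[msb] += 1
--
--     result = 0
--
--     for count in groups.values():
--         result += count * (count - 1) // 2
--
--     return result
-- ===== SOURCE B (Python) =====
-- def user_logic(n, arr):
--     # Sort the bit-lengths; equal values become contiguous runs, and each
--     # element pairs with exactly the earlier members of its own run.
--     bls = sorted(x.bit_length() for x in arr)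
--     total = 0
--     runlen = 0
--     prev = None
--     for m in bls:
--         if m == prev:
--             runlen += 1
--         else:
--             runlen = 0
--             prev = m
--         total += runlen
--     return total
-- ===== Notes on version B (the rewrite author's own statement) =====
-- stated objective: alternative
-- what changed: Replaces the hash-table grouping plus count*(count-1)//2 summation by sorting the bit-lengths and scanning runs of equal values, accumulating for each element the length of its current run so far (no dict, no combination formula).
import Mathlib
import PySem

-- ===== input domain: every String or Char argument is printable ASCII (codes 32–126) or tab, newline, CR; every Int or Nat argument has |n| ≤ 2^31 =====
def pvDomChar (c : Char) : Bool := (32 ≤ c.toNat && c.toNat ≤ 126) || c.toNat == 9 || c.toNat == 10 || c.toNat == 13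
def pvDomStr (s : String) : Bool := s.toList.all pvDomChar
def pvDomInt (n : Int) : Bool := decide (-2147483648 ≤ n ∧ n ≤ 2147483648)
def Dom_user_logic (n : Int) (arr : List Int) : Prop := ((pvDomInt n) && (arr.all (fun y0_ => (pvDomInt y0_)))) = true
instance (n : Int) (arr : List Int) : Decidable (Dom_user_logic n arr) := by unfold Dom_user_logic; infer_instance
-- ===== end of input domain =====

-- B replaces A's hash-grouping + C(c,2) formula by sort-then-run-scan over
-- the bit-lengths; same return value, proved below.

-- ===== PORT A =====
-- groups = defaultdict(int); for x in arr: groups[x.bit_length()] += 1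
-- result = 0; for count in groups.values(): result += count*(count-1)//2
def user_logic (n : Int) (arr : List Int) : Int :=
  let groups : PySem.Dict Int Int :=
    arr.foldl (fun d x => d.modify ((PySem.Int.bitLength x : Int)) 0 (· + 1)) PySem.Dict.empty
  groups.values.foldl (fun result count => result + PySem.Int.floordiv (count * (count - 1)) 2) 0

-- ===== PORT B =====
-- for m in bls: if m == prev: runlen += 1 else: runlen = 0; prev = m; total += runlen
def pvScanB : List Int → Option Int → Int → Int → Int
  | [], _, _, total => total
  | m :: t, prev, runlen, total =>
    if some m = prev then pvScanB t prev (runlen + 1) (total + (runlen + 1))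
    else pvScanB t (some m) 0 (total + 0)

-- bls = sorted(x.bit_length() for x in arr); total = 0; runlen = 0; prev = None; <loop>
def user_logic_alt (n : Int) (arr : List Int) : Int :=
  let bls := PySem.List.sorted (arr.map (fun x => (PySem.Int.bitLength x : Int))) (fun m => m) false
  pvScanB bls none 0 0

-- ===== PRECONDITION & SPEC =====
def Spec_user_logic (n : Int) (arr : List Int) (out : Int) : Prop := out = user_logic_alt n arr
instance (n : Int) (arr : List Int) (out : Int) : Decidable (Spec_user_logic n arr out) := by unfold Spec_user_logic; infer_instance

-- ===== CLAIM =====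
def Claim_equal_user_logic : Prop := ∀ (n : Int) (arr : List Int), Dom_user_logic n arr → Spec_user_logic n arr (user_logic n arr)

-- ===== LEMMAS AND PROOFS =====

-- C(c,2) as A computes it
def pvC2 (c : Int) : Int := PySem.Int.floordiv (c * (c - 1)) 2

-- A's second loop over a dict, as a function of the dict
def pvT (d : PySem.Dict Int Int) : Int := (d.values.map pvC2).sum

-- proof-side reference: pair enumeration (each element counts its earlier equals)
def pvLoopB : List Int → Int → Int
  | [], total => total
  | m :: rest, total => pvLoopB rest (total + (rest.count m : Int))

lemma pvC2_succ (c : Int) : pvC2 (c + 1) = pvC2 c + c := by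
  have h2 : (0:Int) < 2 := by norm_num
  unfold pvC2
  rw [PySem.Int.floordiv_eq_ediv_of_pos h2, PySem.Int.floordiv_eq_ediv_of_pos h2]
  obtain ⟨m, hm⟩ := Int.even_mul_succ_self (c - 1)
  have h1 : c * (c - 1) = 2 * m := by nlinarith [hm]
  have h2' : (c + 1) * (c + 1 - 1) = 2 * (m + c) := by nlinarith [hm]
  rw [h1, h2', Int.mul_ediv_cancel_left _ (by norm_num), Int.mul_ediv_cancel_left _ (by norm_num)]

-- sum over a nodup list where the mapped function changes only at one member
lemma pv_sum_map_update (l : List Int) (f g : Int → Int) (k δ : Int)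
    (hnd : l.Nodup) (hk : k ∈ l) (hf : f k = g k + δ)
    (hother : ∀ j ∈ l, j ≠ k → f j = g j) :
    (l.map f).sum = (l.map g).sum + δ := by
  induction l with
  | nil => cases hk
  | cons a t ih =>
    rcases List.mem_cons.mp hk with rfl | hkt
    · have : ∀ j ∈ t, f j = g j := by
        intro j hj
        exact hother j (List.mem_cons_of_mem _ hj)
          (fun h => (List.nodup_cons.mp hnd).1 (h ▸ hj))
      simp [hf, List.map_congr_left this]; ring
    · have hak : a ≠ k := fun h => (List.nodup_cons.mp hnd).1 (h ▸ hkt)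
      have := ih (List.nodup_cons.mp hnd).2 hkt
        (fun j hj hjk => hother j (List.mem_cons_of_mem _ hj) hjk)
      simp [hother a List.mem_cons_self hak, this]; ring

lemma pvT_insert (d : PySem.Dict Int Int) (k : Int) (hnd : d.keys.Nodup) :
    pvT (d.insert k (d.getD k 0 + 1)) = pvT d + d.getD k 0 := by
  unfold pvT
  rw [PySem.Dict.values_eq_map_keys _ (PySem.Dict.nodup_keys_insert d k _ hnd) 0,
      PySem.Dict.values_eq_map_keys d hnd 0, List.map_map, List.map_map]
  by_cases hc : d.contains k = true
  · rw [PySem.Dict.keys_insert_of_contains d _ hc]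
    refine pv_sum_map_update _ _ _ k (d.getD k 0) hnd
      ((PySem.Dict.contains_iff_mem_keys d k).mp hc) ?_ ?_
    · simp [PySem.Dict.getD_insert_self, pvC2_succ]
    · intro j _ hjk
      simp [Function.comp, PySem.Dict.getD_insert_of_ne d _ _ hjk]
  · have hc' : d.contains k = false := by simpa using hc
    have hk0 : d.getD k 0 = 0 := PySem.Dict.getD_of_not_contains d 0 hc'
    rw [PySem.Dict.keys_insert_of_not_contains d _ hc']
    have hmap : ∀ j ∈ d.keys, (pvC2 ∘ fun j => (d.insert k (d.getD k 0 + 1)).getD j 0) j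
        = (pvC2 ∘ fun j => d.getD j 0) j := by
      intro j hj
      have hjk : j ≠ k := fun h =>
        hc ((PySem.Dict.contains_iff_mem_keys d k).mpr (h ▸ hj))
      simp [Function.comp, PySem.Dict.getD_insert_of_ne d _ _ hjk]
    rw [List.map_append, List.map_congr_left hmap]
    simp [Function.comp, PySem.Dict.getD_insert_self, hk0]
    decide

-- the reference loop peels an accumulator
lemma pvLoopB_acc (l : List Int) : ∀ (t c : Int), pvLoopB l (t + c) = pvLoopB l t + c := by
  induction l with
  | nil => intro t c; simp [pvLoopB]
  | cons m rest ih =>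
    intro t c
    simp only [pvLoopB]
    rw [show t + c + (rest.count m : Int) = (t + (rest.count m : Int)) + c by ring, ih]

lemma pvLoopB_cons (m : Int) (l : List Int) :
    pvLoopB (m :: l) 0 = pvLoopB l 0 + (l.count m : Int) := by
  show pvLoopB l (0 + (l.count m : Int)) = _
  rw [pvLoopB_acc]

-- pair enumeration is invariant under permutation
lemma pvLoopB_perm {l₁ l₂ : List Int} (h : l₁.Perm l₂) : pvLoopB l₁ 0 = pvLoopB l₂ 0 := by
  induction h with
  | nil => rfl
  | cons x h ih => rw [pvLoopB_cons, pvLoopB_cons, ih, h.count_eq]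
  | swap x y l =>
    rw [pvLoopB_cons, pvLoopB_cons, pvLoopB_cons, pvLoopB_cons]
    rcases eq_or_ne x y with rfl | hxy
    · ring
    · simp [List.count_cons, hxy, Ne.symm hxy]; ring
  | trans _ _ ih₁ ih₂ => rw [ih₁, ih₂]

-- appending one element adds its count in the prefix
lemma pvLoopB_append (l : List Int) (m : Int) :
    ∀ (t : Int), pvLoopB (l ++ [m]) t = pvLoopB l t + (l.count m : Int) := by
  induction l with
  | nil => intro t; simp [pvLoopB]
  | cons a rest ih =>
    intro t
    simp only [List.cons_append, pvLoopB, ih]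
    have hcnt : ((rest ++ [m]).count a : Int) = (rest.count a : Int) + if m = a then 1 else 0 := by
      rcases eq_or_ne m a with h | h
      · simp [List.count_append, h]
      · simp [List.count_append, h]
    rw [hcnt, show t + ((rest.count a : Int) + if m = a then 1 else 0)
          = (t + (rest.count a : Int)) + if m = a then 1 else 0 by ring, pvLoopB_acc]
    have hcm : ((a :: rest).count m : Int) = (rest.count m : Int) + if m = a then 1 else 0 := by
      rcases eq_or_ne m a with h | h
      · simp [List.count_cons, h]
      · simp [List.count_cons, h, Ne.symm h]
    rw [hcm]; ring

-- bridge 1: A's grouped C(c,2) total equals pair enumeration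
lemma pvT_counter_eq_pvLoopB (ms : List Int) :
    pvT (PySem.Dict.counter ms) = pvLoopB ms 0 := by
  induction ms using List.reverseRecOn with
  | nil => simp [pvT, PySem.Dict.counter, PySem.Dict.empty, PySem.Dict.values, pvLoopB]
  | append_singleton l m ih =>
    have hcnt : PySem.Dict.counter (l ++ [m])
        = (PySem.Dict.counter l).insert m ((PySem.Dict.counter l).getD m 0 + 1) := by
      rw [← PySem.Dict.foldl_insert_getD_add_one_eq_counter,
          ← PySem.Dict.foldl_insert_getD_add_one_eq_counter, List.foldl_append]
      simp
    rw [hcnt, pvT_insert _ _ (PySem.Dict.nodup_keys_counter l), ih,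
        PySem.Dict.getD_counter, pvLoopB_append]

-- bridge 2: on a sorted list, the run-scan equals pair enumeration
lemma pvScanB_some (s : List Int) : ∀ (p k total : Int), s.Pairwise (· ≤ ·) →
    (∀ m ∈ s, p ≤ m) → pvScanB s (some p) k total
      = total + pvLoopB s 0 + (k + 1) * (s.count p : Int) := by
  induction s with
  | nil => intro p k total _ _; simp [pvScanB, pvLoopB]
  | cons m t ih =>
    intro p k total hpw hle
    have hpwt : t.Pairwise (· ≤ ·) := (List.pairwise_cons.mp hpw).2
    have hmt : ∀ y ∈ t, m ≤ y := (List.pairwise_cons.mp hpw).1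
    simp only [pvScanB]
    rcases eq_or_ne m p with rfl | hne
    · rw [if_pos rfl, ih m (k + 1) (total + (k + 1)) hpwt hmt, pvLoopB_cons,
          List.count_cons_self]
      push_cast
      ring
    · rw [if_neg (by simpa using hne)]
      have hpm : p < m := lt_of_le_of_ne (hle m List.mem_cons_self) (Ne.symm hne)
      have hpt : (m :: t).count p = 0 := by
        rw [List.count_eq_zero]
        intro hmem
        rcases List.mem_cons.mp hmem with rfl | hmem'
        · exact hne rfl
        · exact absurd (lt_of_lt_of_le hpm (hmt p hmem')) (lt_irrefl p)
      rw [ih m 0 (total + 0) hpwt hmt, pvLoopB_cons, hpt]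
      push_cast
      ring
  
lemma pvScanB_none (s : List Int) (hpw : s.Pairwise (· ≤ ·)) :
    pvScanB s none 0 0 = pvLoopB s 0 := by
  cases s with
  | nil => rfl
  | cons m t =>
    have hpwt : t.Pairwise (· ≤ ·) := (List.pairwise_cons.mp hpw).2
    have hmt : ∀ y ∈ t, m ≤ y := (List.pairwise_cons.mp hpw).1
    simp only [pvScanB, reduceCtorEq, if_neg]
    rw [pvScanB_some t m 0 (0 + 0) hpwt hmt, pvLoopB_cons]
    simp

-- ===== VERDICT =====
theorem user_logic_spec : Claim_equal_user_logic := by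
  intro n arr _
  unfold Spec_user_logic user_logic user_logic_alt
  have hA : (arr.foldl (fun d x => d.modify ((PySem.Int.bitLength x : Int)) 0 (· + 1)) PySem.Dict.empty)
      = PySem.Dict.counter (arr.map (fun x => (PySem.Int.bitLength x : Int))) := by
    rw [PySem.Dict.counter_eq_foldl, List.foldl_map]
  rw [hA]
  rw [show (fun (result count : Int) => result + PySem.Int.floordiv (count * (count - 1)) 2)
        = (fun acc x => acc + pvC2 x) from rfl, PySem.List.foldl_add]
  set ms := arr.map (fun x => (PySem.Int.bitLength x : Int)) with hms
  have hsorted : (PySem.List.sorted ms (fun m => m) false).Pairwise (· ≤ ·) :=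
    PySem.List.sorted_pairwise ms (fun m => m)
  have hperm : (PySem.List.sorted ms (fun m => m) false).Perm ms :=
    PySem.List.sorted_perm ms (fun m => m) false
  rw [pvScanB_none _ hsorted, pvLoopB_perm hperm, ← pvT_counter_eq_pvLoopB]
  unfold pvT
  simp
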